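-- pv_equiv track=rewrite | github.com/TechSBEM/_python | 0x03_Methods/trials_codesignal.py | solution
-- ===== SOURCE A (Python) =====
-- def solution(a, k):
--     count = 0
--     n = len(a)
--
--     for i in range(n):
--         for j in range(i + 1, n):  # Ensure i < j
--             if (a[i] + a[j]) % k == 0:
--                 count += 1
--
--     return count
-- ===== SOURCE B (Python) =====
-- def solution(a, k):
--     # One pass with a residue counter: for each x, pairs with earlier elements
--     # whose residue is (-x) % k; O(n) instead of A's O(n^2) double loop.
--     count = 0
--     seen = {}
--     for x in a:
--         count += seen.get((-x) % k, 0)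
--         r = x % k
--         seen[r] = seen.get(r, 0) + 1
--     return count
-- ===== Notes on version B (the rewrite author's own statement) =====
-- stated objective: faster
-- what changed: Replaces the O(n^2) double loop over index pairs by a single pass that keeps a dict of residue counts and, for each element, adds the count of earlier elements with the complementary residue.
-- outside the precondition, e.g. on solution([5], 0): A returns 0, B raises ZeroDivisionError
import Mathlib
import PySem

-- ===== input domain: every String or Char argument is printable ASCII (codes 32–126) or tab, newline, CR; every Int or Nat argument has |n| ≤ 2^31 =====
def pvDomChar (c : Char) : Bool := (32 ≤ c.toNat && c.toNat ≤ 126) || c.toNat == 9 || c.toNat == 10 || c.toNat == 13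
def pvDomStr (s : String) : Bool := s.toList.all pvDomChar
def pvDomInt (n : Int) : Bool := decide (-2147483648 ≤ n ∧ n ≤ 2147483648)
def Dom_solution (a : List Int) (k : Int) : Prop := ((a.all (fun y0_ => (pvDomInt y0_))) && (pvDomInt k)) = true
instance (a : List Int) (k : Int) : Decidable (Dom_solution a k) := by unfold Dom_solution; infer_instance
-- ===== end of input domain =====

-- B replaces A's O(n^2) double loop by a single pass keeping a dict of residue counts.

-- ===== PORT A =====
def solution (a : List Int) (k : Int) : Int :=
  let n : Int := a.length
  (PySem.List.pyRange 0 n 1).foldl (fun count i =>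
    (PySem.List.pyRange (i + 1) n 1).foldl (fun count j =>
      if PySem.Int.mod (PySem.List.pyGetD a i 0 + PySem.List.pyGetD a j 0) k = 0
      then count + 1 else count) count) 0

-- ===== PORT B =====
def solution_alt (a : List Int) (k : Int) : Int :=
  (a.foldl (fun (st : Int × PySem.Dict Int Int) x =>
      (st.1 + st.2.getD (PySem.Int.mod (-x) k) 0,
       st.2.insert (PySem.Int.mod x k) (st.2.getD (PySem.Int.mod x k) 0 + 1)))
    (0, PySem.Dict.empty)).1

-- ===== PRECONDITION & SPEC =====
-- Pre_ excludes k = 0, where Python's '%' raises ZeroDivisionError (in A as soon as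
-- the list has two elements, in B as soon as it has one; for shorter lists A returns 0).
def Pre_solution (a : List Int) (k : Int) : Prop := k ≠ 0
instance (a : List Int) (k : Int) : Decidable (Pre_solution a k) := by unfold Pre_solution; infer_instance
def pvWitness_solution : List Int × Int := ([1, 2, 3, 4], 2)

def Spec_solution (a : List Int) (k : Int) (out : Int) : Prop := out = solution_alt a k
instance (a : List Int) (k : Int) (out : Int) : Decidable (Spec_solution a k out) := by unfold Spec_solution; infer_instance

-- ===== CLAIM (what is proved, stated in full; the proofs are below) =====
def Claim_equal_solution : Prop := ∀ (a : List Int) (k : Int), Dom_solution a k → Pre_solution a k → Spec_solution a k (solution a k)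

-- ===== LEMMAS AND PROOFS =====

-- number of pairs i < j with (a i + a j) % k == 0, structurally
def pairCount (k : Int) : List Int → Int
  | [] => 0
  | x :: xs => (xs.countP (fun y => decide (PySem.Int.mod (x + y) k = 0)) : Int) + pairCount k xs

lemma mod_eq_mod_iff_dvd (a b k : Int) (hk : k ≠ 0) :
    PySem.Int.mod a k = PySem.Int.mod b k ↔ k ∣ a - b := by
  have ha := PySem.Int.floordiv_mul_add_mod a k
  have hb := PySem.Int.floordiv_mul_add_mod b k
  constructor
  · intro h
    exact ⟨PySem.Int.floordiv a k - PySem.Int.floordiv b k, by linear_combination -ha + hb + h⟩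
  · rintro ⟨t, ht⟩
    have hd : k ∣ PySem.Int.mod a k - PySem.Int.mod b k :=
      ⟨t - PySem.Int.floordiv a k + PySem.Int.floordiv b k, by linear_combination ha - hb + ht⟩
    have hz : PySem.Int.mod a k - PySem.Int.mod b k = 0 := by
      rcases lt_or_gt_of_ne hk with hneg | hpos
      · have h1 := PySem.Int.mod_neg_bounds a hneg
        have h2 := PySem.Int.mod_neg_bounds b hneg
        exact Int.eq_zero_of_abs_lt_dvd ((neg_dvd).mpr hd) (by rw [abs_lt]; omega)
      · have h1 := PySem.Int.mod_nonneg a hpos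
        have h2 := PySem.Int.mod_lt a hpos
        have h3 := PySem.Int.mod_nonneg b hpos
        have h4 := PySem.Int.mod_lt b hpos
        exact Int.eq_zero_of_abs_lt_dvd hd (by rw [abs_lt]; omega)
    omega

lemma mod_eq_negmod_iff (u x k : Int) (hk : k ≠ 0) :
    (PySem.Int.mod u k = PySem.Int.mod (-x) k) ↔ (PySem.Int.mod (u + x) k = 0) := by
  rw [mod_eq_mod_iff_dvd u (-x) k hk, PySem.Int.mod_eq_zero_iff_dvd]
  constructor <;> · intro ⟨t, h⟩; exact ⟨t, by linarith⟩

-- A computes the index-pair sum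
lemma solution_eq_sum (a : List Int) (k : Int) :
    solution a k = ((List.range a.length).map (fun i =>
      (((a.drop (i + 1)).countP (fun y => decide (PySem.Int.mod (a.getD i 0 + y) k = 0))) : Int))).sum := by
  simp only [solution]
  have step1 := PySem.List.foldl_congr_mem (PySem.List.pyRange 0 (a.length : Int) 1)
    (fun count i => List.foldl (fun count j =>
        if PySem.Int.mod (PySem.List.pyGetD a i 0 + PySem.List.pyGetD a j 0) k = 0
        then count + 1 else count) count (PySem.List.pyRange (i + 1) (a.length : Int) 1))
    (fun c i => c + (((a.drop (i + 1).toNat).countP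
        (fun y => decide (PySem.Int.mod (PySem.List.pyGetD a i 0 + y) k = 0))) : Int))
    0
    (by
      intro acc i hi
      dsimp only
      have h0 : (0:Int) ≤ i + 1 := by
        have := (PySem.List.mem_pyRange_one.mp hi).1; omega
      rw [PySem.List.foldl_pyRange_pyGetD' a 0
        (fun c y => if PySem.Int.mod (PySem.List.pyGetD a i 0 + y) k = 0 then c + 1 else c) acc h0,
        PySem.List.foldl_ite_add_one])
  rw [step1]
  rw [PySem.List.foldl_add]
  rw [PySem.List.pyRange_zero_nat]
  rw [List.map_map]
  simp only [Function.comp_def, zero_add]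
  apply congrArg
  apply List.map_congr_left
  intro m hm
  have h1 : ((m : Int) + 1).toNat = m + 1 := by omega
  rw [h1, PySem.List.pyGetD_natCast]

lemma sum_eq_pairCount (k : Int) : ∀ (a : List Int),
    ((List.range a.length).map (fun i =>
      (((a.drop (i + 1)).countP (fun y => decide (PySem.Int.mod (a.getD i 0 + y) k = 0))) : Int))).sum
    = pairCount k a := by
  intro a
  induction a with
  | nil => simp [pairCount]
  | cons x xs ih =>
    rw [List.length_cons, List.range_succ_eq_map, List.map_cons, List.map_map, List.sum_cons]
    simp only [Function.comp_def, List.drop_succ_cons, List.getD_cons_succ, List.getD_cons_zero,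
      List.drop_zero]
    rw [ih, pairCount]

-- adding x to the prefix adds x's matches with each later element
lemma cross_append (k x : Int) (pre : List Int) : ∀ xs : List Int,
    (xs.map (fun y => ((pre ++ [x]).countP
        (fun u => decide (PySem.Int.mod (u + y) k = 0)) : Int))).sum
    = (xs.map (fun y => (pre.countP (fun u => decide (PySem.Int.mod (u + y) k = 0)) : Int))).sum
      + (xs.countP (fun y => decide (PySem.Int.mod (x + y) k = 0)) : Int) := by
  intro xs
  induction xs with
  | nil => simp
  | cons y ys ihy =>
    rw [List.map_cons, List.sum_cons, ihy, List.map_cons, List.sum_cons, List.countP_cons,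
      List.countP_append, List.countP_singleton]
    push_cast
    split_ifs <;> ring

-- B's loop invariant: cnt counts residues of the processed prefix
lemma alt_run (k : Int) (hk : k ≠ 0) : ∀ (l : List Int) (c : Int) (cnt : PySem.Dict Int Int)
    (pre : List Int),
    (∀ r, cnt.getD r 0 = (pre.countP (fun u => decide (PySem.Int.mod u k = r)) : Int)) →
    (l.foldl (fun (st : Int × PySem.Dict Int Int) x =>
        (st.1 + st.2.getD (PySem.Int.mod (-x) k) 0,
         st.2.insert (PySem.Int.mod x k) (st.2.getD (PySem.Int.mod x k) 0 + 1))) (c, cnt)).1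
    = c + (l.map (fun x => (pre.countP (fun u => decide (PySem.Int.mod (u + x) k = 0)) : Int))).sum
        + pairCount k l := by
  intro l
  induction l with
  | nil => intro c cnt pre hinv; simp [pairCount]
  | cons x xs ih =>
    intro c cnt pre hinv
    rw [List.foldl_cons]
    rw [ih (c + cnt.getD (PySem.Int.mod (-x) k) 0) _ (pre ++ [x]) (by
      intro r
      rw [PySem.Dict.getD_insert, List.countP_append, List.countP_singleton]
      by_cases hr : r = PySem.Int.mod x k
      · subst hr; rw [if_pos rfl, hinv]; simp
      · rw [if_neg hr, hinv]
        have : (decide (PySem.Int.mod x k = r)) = false := by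
          simp; intro h; exact hr h.symm
        rw [this]; simp)]
    rw [hinv]
    have hcnt : pre.countP (fun u => decide (PySem.Int.mod u k = PySem.Int.mod (-x) k))
        = pre.countP (fun u => decide (PySem.Int.mod (u + x) k = 0)) := by
      apply List.countP_congr
      intro u _
      simp only [decide_eq_true_eq]
      exact mod_eq_negmod_iff u x k hk
    rw [hcnt]
    rw [List.map_cons, List.sum_cons, cross_append k x pre xs, pairCount]
    ring

-- ===== VERDICT (by name: the statement is the Claim_ definition above) =====
theorem solution_spec : Claim_equal_solution := by
  intro a k _ hk
  unfold Spec_solution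
  rw [solution_eq_sum, sum_eq_pairCount]
  unfold solution_alt
  rw [alt_run k hk a 0 PySem.Dict.empty [] (by intro r; simp [PySem.Dict.getD_empty])]
  simp
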